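-- pv_equiv track=rewrite | github.com/mld-0/hackerrank | 3-months-prep/04-01-picking-numbers.py | pickingNumbers_ii
-- ===== SOURCE A (Python) =====
-- import math
-- from collections import Counter
--
-- def pickingNumbers_ii(a):
--     a_counts = Counter(a)
--     keys = sorted(a_counts.keys())
--
--     possible_values = dict()
--     previous = -math.inf
--     for x in keys:
--         possible_values[x] = a_counts[x]
--         if (x-1 == previous):
--             possible_values[(previous, x)] = a_counts[previous] + a_counts[x]
--         previous = x
--
--     return max(possible_values.values())
-- ===== SOURCE B (Python) =====
-- from collections import Counter
--
-- def pickingNumbers_ii(a):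
--     cnt = Counter(a)
--     return max(cnt[v] + cnt[v + 1] for v in cnt)
-- ===== Notes on version B (the rewrite author's own statement) =====
-- stated objective: simpler
-- what changed: Drops the sort and the ordered previous-tracking scan that builds a dict of candidate values; B takes one unordered pass over the Counter's distinct keys, taking the max of cnt[v] + cnt[v+1] with a direct hash lookup of the neighbour.
import Mathlib
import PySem

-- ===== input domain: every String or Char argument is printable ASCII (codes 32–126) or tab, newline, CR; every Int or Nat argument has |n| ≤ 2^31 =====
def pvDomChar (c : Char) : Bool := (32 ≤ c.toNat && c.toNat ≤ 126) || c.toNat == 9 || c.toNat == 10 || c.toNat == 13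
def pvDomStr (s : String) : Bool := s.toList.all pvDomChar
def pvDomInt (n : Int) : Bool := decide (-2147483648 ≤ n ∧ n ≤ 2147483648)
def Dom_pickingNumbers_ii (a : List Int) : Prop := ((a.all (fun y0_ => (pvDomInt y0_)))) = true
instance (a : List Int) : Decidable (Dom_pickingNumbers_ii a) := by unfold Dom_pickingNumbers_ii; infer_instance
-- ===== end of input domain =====

-- B replaces A's sort + ordered previous-tracking scan by one unordered pass over the
-- Counter's distinct keys taking max of cnt[v] + cnt[v+1] (objective: simpler).

-- ===== PORT A =====
-- possible_values has both int keys (x) and tuple keys ((previous, x)): key type PKey.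
inductive PKey
  | single : Int → PKey
  | pair : Int → Int → PKey
deriving DecidableEq, Repr

-- previous = -math.inf is modelled as `none`: an int never compares equal to -inf, exact here.
def pickStep (aCounts : PySem.Dict Int Int)
    (st : PySem.Dict (PKey) Int × Option Int) (x : Int) :
    PySem.Dict (PKey) Int × Option Int :=
  let pv := st.1.insert (PKey.single x) (aCounts.getD x 0)
  let pv := match st.2 with
    | some p =>
        if x - 1 = p then
          pv.insert (PKey.pair p x) (aCounts.getD p 0 + aCounts.getD x 0)
        else pv
    | none => pv
  (pv, some x)

def pickingNumbers_ii (a : List Int) : Int :=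
  let aCounts := PySem.Dict.counter a
  let keys := PySem.List.sorted aCounts.keys (fun x => x)
  let st := keys.foldl (pickStep aCounts) (PySem.Dict.empty, none)
  -- max(...) raises ValueError on an empty dict (empty a); Pre_ excludes that input
  (PySem.List.max? st.1.values (fun v => v)).getD 0

-- ===== PORT B =====
def pickingNumbers_ii_alt (a : List Int) : Int :=
  let cnt := PySem.Dict.counter a
  -- max(...) over the generator raises ValueError on empty a; Pre_ excludes that input
  (PySem.List.max? (cnt.keys.map (fun v => cnt.getD v 0 + cnt.getD (v + 1) 0)) (fun x => x)).getD 0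

-- ===== PRECONDITION & SPEC =====
-- Pre_ excludes only the empty list, on which both A and B raise ValueError (max of empty).
def Pre_pickingNumbers_ii (a : List Int) : Prop := a ≠ []
instance (a : List Int) : Decidable (Pre_pickingNumbers_ii a) := by unfold Pre_pickingNumbers_ii; infer_instance

def pvWitness_pickingNumbers_ii : List Int := [4, 6, 5, 3, 3, 1]

def Spec_pickingNumbers_ii (a : List Int) (out : Int) : Prop := out = pickingNumbers_ii_alt a
instance (a : List Int) (out : Int) : Decidable (Spec_pickingNumbers_ii a out) := by unfold Spec_pickingNumbers_ii; infer_instance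

-- ===== CLAIM (what is proved, stated in full; the proofs are below) =====
def Claim_equal_pickingNumbers_ii : Prop := ∀ (a : List Int), Dom_pickingNumbers_ii a → Pre_pickingNumbers_ii a → Spec_pickingNumbers_ii a (pickingNumbers_ii a)

-- ===== LEMMAS AND PROOFS =====

-- the items A's loop appends to possible_values, written as explicit recursion over the sorted keys
def buildPV (c : Int → Int) : Option Int → List Int → List ((PKey) × Int)
  | _, [] => []
  | prev, x :: t =>
    ((PKey.single x, c x) ::
      (match prev with
       | some p => if x - 1 = p then [(PKey.pair p x, c p + c x)] else []
       | none => [])) ++ buildPV c (some x) t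

lemma foldl_pickStep_items (d : PySem.Dict Int Int) :
    ∀ (ks : List Int) (pv : PySem.Dict (PKey) Int) (prev : Option Int),
    ks.Pairwise (· < ·) →
    (∀ x ∈ ks, pv.contains (PKey.single x) = false) →
    (∀ x ∈ ks, ∀ y : Int, pv.contains (PKey.pair y x) = false) →
    (ks.foldl (pickStep d) (pv, prev)).1.items
      = pv.items ++ buildPV (fun v => d.getD v 0) prev ks := by
  intro ks
  induction ks with
  | nil => intro pv prev _ _ _; simp [buildPV]
  | cons x t ih =>
    intro pv prev hpw h1 h2
    have hxt : ∀ y ∈ t, x < y := (List.pairwise_cons.mp hpw).1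
    have hpwt : t.Pairwise (· < ·) := (List.pairwise_cons.mp hpw).2
    have hc1 : pv.contains (PKey.single x) = false := h1 x (by simp)
    -- items of the two inserts
    have hi1 : (pv.insert (PKey.single x) (d.getD x 0)).items
        = pv.items ++ [(PKey.single x, d.getD x 0)] :=
      PySem.Dict.items_insert_of_not_contains pv _ hc1
    simp only [List.foldl_cons, pickStep]
    cases prev with
    | none =>
      rw [ih _ _ hpwt
        (by intro y hy
            rw [PySem.Dict.contains_insert]
            have : y ≠ x := by have := hxt y hy; omega
            simp [this, h1 y (by simp [hy])])
        (by intro y hy z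
            rw [PySem.Dict.contains_insert]
            simp [h2 y (by simp [hy]) z])]
      rw [hi1]
      simp [buildPV]
    | some p =>
      by_cases hp : x - 1 = p
      · have hc2 : (pv.insert (PKey.single x) (d.getD x 0)).contains (PKey.pair p x) = false := by
          rw [PySem.Dict.contains_insert]
          simp [h2 x (by simp) p]
        have hi2 : ((pv.insert (PKey.single x) (d.getD x 0)).insert (PKey.pair p x)
              (d.getD p 0 + d.getD x 0)).items
            = pv.items ++ [(PKey.single x, d.getD x 0)] ++ [(PKey.pair p x, d.getD p 0 + d.getD x 0)] := by
          rw [PySem.Dict.items_insert_of_not_contains _ _ hc2, hi1]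
        simp only [hp, if_true]
        rw [ih _ _ hpwt
          (by intro y hy
              rw [PySem.Dict.contains_insert, PySem.Dict.contains_insert]
              have : y ≠ x := by have := hxt y hy; omega
              simp [this, h1 y (by simp [hy])])
          (by intro y hy z
              rw [PySem.Dict.contains_insert, PySem.Dict.contains_insert]
              have : y ≠ x := by have := hxt y hy; omega
              simp [this, h2 y (by simp [hy]) z])]
        rw [hi2]
        simp [buildPV, hp]
      · simp only [if_neg hp]
        rw [ih _ _ hpwt
          (by intro y hy
              rw [PySem.Dict.contains_insert]
              have : y ≠ x := by have := hxt y hy; omega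
              simp [this, h1 y (by simp [hy])])
          (by intro y hy z
              rw [PySem.Dict.contains_insert]
              simp [h2 y (by simp [hy]) z])]
        rw [hi1]
        simp [buildPV, hp]

-- every value in possible_values is a single count of a key or an adjacent-pair sum of keys
lemma buildPV_mem_shape (c : Int → Int) (P : Int → Prop) :
    ∀ (prev : Option Int) (ks : List Int),
    (∀ p, prev = some p → P p) → (∀ x ∈ ks, P x) →
    ∀ v ∈ (buildPV c prev ks).map Prod.snd,
      (∃ x, P x ∧ v = c x) ∨ (∃ x, P (x - 1) ∧ P x ∧ v = c (x - 1) + c x) := by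
  intro prev ks
  induction ks generalizing prev with
  | nil => simp [buildPV]
  | cons x t ih =>
    intro hprev hks v hv
    have hPx : P x := hks x (by simp)
    simp only [buildPV, List.map_append, List.mem_append, List.map_cons, List.mem_cons] at hv
    rcases hv with (hv | hv) | hv
    · exact Or.inl ⟨x, hPx, hv⟩
    · cases prev with
      | none => simp at hv
      | some p =>
        by_cases hp : x - 1 = p
        · simp [hp] at hv
          refine Or.inr ⟨x, ?_, hPx, by rw [hv, hp]⟩
          rw [hp]; exact hprev p rfl
        · simp [hp] at hv
    · exact ih (some x) (by intro q hq; injection hq with h; exact h ▸ hPx) (fun y hy => hks y (by simp [hy])) v (by simpa using hv)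

lemma buildPV_single_mem (c : Int → Int) :
    ∀ (prev : Option Int) (ks : List Int) (x : Int), x ∈ ks →
    c x ∈ (buildPV c prev ks).map Prod.snd := by
  intro prev ks
  induction ks generalizing prev with
  | nil => simp
  | cons y t ih =>
    intro x hx
    rcases List.mem_cons.mp hx with h | h
    · subst h; simp [buildPV]
    · simp only [buildPV, List.map_append, List.mem_append]
      exact Or.inr (ih (some y) x h)

lemma buildPV_pair_mem (c : Int → Int) :
    ∀ (prev : Option Int) (ks : List Int) (v : Int), ks.Pairwise (· < ·) →
    v ∈ ks → v + 1 ∈ ks →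
    c v + c (v + 1) ∈ (buildPV c prev ks).map Prod.snd := by
  intro prev ks
  induction ks generalizing prev with
  | nil => simp
  | cons x t ih =>
    intro v hpw hv hv1
    have hxt : ∀ y ∈ t, x < y := (List.pairwise_cons.mp hpw).1
    have hpwt : t.Pairwise (· < ·) := (List.pairwise_cons.mp hpw).2
    by_cases hvx : v = x
    · subst hvx
      have hv1t : v + 1 ∈ t := by
        rcases List.mem_cons.mp hv1 with h | h
        · omega
        · exact h
      cases t with
      | nil => simp at hv1t
      | cons y t' =>
        have hy : y = v + 1 := by
          rcases List.mem_cons.mp hv1t with h | h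
          · omega
          · have h1 : y < v + 1 := (List.pairwise_cons.mp hpwt).1 _ h
            have h2 : v < y := hxt y (by simp)
            omega
        subst hy
        simp only [buildPV, List.map_append, List.mem_append]
        refine Or.inr (Or.inl ?_)
        simp [show v + 1 - 1 = v by omega]
    · have hvt : v ∈ t := by
        rcases List.mem_cons.mp hv with h | h
        · exact absurd h hvx
        · exact h
      have hv1t : v + 1 ∈ t := by
        rcases List.mem_cons.mp hv1 with h | h
        · exfalso; have := hxt v hvt; omega
        · exact h
      simp only [buildPV, List.map_append, List.mem_append]
      exact Or.inr (ih (some x) v hpwt hvt hv1t)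

lemma counter_getD_nonneg (a : List Int) (v : Int) :
    0 ≤ (PySem.Dict.counter a).getD v 0 := by
  rw [PySem.Dict.getD_counter]
  exact Int.natCast_nonneg _

lemma counter_getD_not_mem (a : List Int) (v : Int) (h : v ∉ a) :
    (PySem.Dict.counter a).getD v 0 = 0 := by
  rw [PySem.Dict.getD_counter, List.count_eq_zero.mpr h]
  rfl

-- ===== VERDICT (by name: the statement is the Claim_ definition above) =====
theorem pickingNumbers_ii_spec : Claim_equal_pickingNumbers_ii := by
  intro a _ hpre
  unfold Spec_pickingNumbers_ii pickingNumbers_ii pickingNumbers_ii_alt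
  simp only []
  set cnt := PySem.Dict.counter a with hcnt
  set c : Int → Int := fun v => cnt.getD v 0 with hc
  set K := cnt.keys with hK
  set S := PySem.List.sorted K (fun x => x) with hS
  -- facts about the sorted key list
  have hKset : K = PySem.Set.ofList a := PySem.Dict.keys_counter a
  have hKmem : ∀ v, v ∈ K ↔ v ∈ a := by
    intro v; rw [hKset]; exact PySem.Set.mem_ofList a v
  have hKnd : K.Nodup := by rw [hKset]; exact PySem.Set.nodup_ofList a
  have hperm : S.Perm K := PySem.List.sorted_perm K (fun x => x) false
  have hSnd : S.Nodup := hperm.nodup_iff.mpr hKnd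
  have hple : S.Pairwise (fun u v => u ≤ v) := PySem.List.sorted_pairwise K (fun x => x)
  have hplt : S.Pairwise (· < ·) :=
    (hple.and hSnd).imp (fun h => lt_of_le_of_ne h.1 h.2)
  have hSmem : ∀ v, v ∈ S ↔ v ∈ K := fun v => hperm.mem_iff
  -- A's value list
  have hitems := foldl_pickStep_items cnt S PySem.Dict.empty none hplt
    (by intro x _; exact PySem.Dict.contains_empty _)
    (by intro x _ y; exact PySem.Dict.contains_empty _)
  have hvalsA : (S.foldl (pickStep cnt) (PySem.Dict.empty, none)).1.values
      = (buildPV c none S).map Prod.snd := by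
    unfold PySem.Dict.values
    rw [hitems]
    simp only [PySem.Dict.empty]
    rfl
  rw [hvalsA]
  set LA := (buildPV c none S).map Prod.snd with hLA
  set LB := K.map (fun v => c v + c (v + 1)) with hLB
  -- nonemptiness
  have hKne : K ≠ [] := by
    intro h
    cases a with
    | nil => exact hpre rfl
    | cons y t =>
      have : y ∈ K := (hKmem y).mpr (by simp)
      simp [h] at this
  have hSne : S ≠ [] := by
    intro h
    cases hk : K with
    | nil => exact hKne hk
    | cons y t =>
      have : y ∈ S := (hSmem y).mpr (by rw [hk]; simp)
      simp [h] at this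
  have hLAne : LA ≠ [] := by
    cases hs : S with
    | nil => exact absurd hs hSne
    | cons y t => rw [hLA, hs]; simp [buildPV]
  have hLBne : LB ≠ [] := by
    rw [hLB]; simpa using hKne
  -- extract the two maxima
  obtain ⟨mA, hmA⟩ : ∃ m, PySem.List.max? LA (fun v => v) = some m := by
    cases h : PySem.List.max? LA (fun v => v) with
    | none => exact absurd ((PySem.List.max?_eq_none_iff LA _).mp h) hLAne
    | some m => exact ⟨m, rfl⟩
  obtain ⟨mB, hmB⟩ : ∃ m, PySem.List.max? LB (fun v => v) = some m := by
    cases h : PySem.List.max? LB (fun v => v) with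
    | none => exact absurd ((PySem.List.max?_eq_none_iff LB _).mp h) hLBne
    | some m => exact ⟨m, rfl⟩
  rw [hmA, hmB]
  simp only [Option.getD_some]
  -- mA ≤ mB
  have hmAmem : mA ∈ LA := PySem.List.max?_mem hmA
  have hmAmax : ∀ y ∈ LA, y ≤ mA := PySem.List.max?_isMax hmA
  have hmBmem : mB ∈ LB := PySem.List.max?_mem hmB
  have hmBmax : ∀ y ∈ LB, y ≤ mB := PySem.List.max?_isMax hmB
  have h1 : mA ≤ mB := by
    rcases buildPV_mem_shape c (fun v => v ∈ K) none S (by simp)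
        (fun x hx => (hSmem x).mp hx) mA hmAmem with ⟨x, hxK, hxv⟩ | ⟨x, hx1K, hxK, hxv⟩
    · have : c x + c (x + 1) ∈ LB := by rw [hLB]; exact List.mem_map_of_mem hxK
      have hle := hmBmax _ this
      have := counter_getD_nonneg a (x + 1)
      rw [hxv]
      have hcx1 : (0:Int) ≤ c (x + 1) := this
      omega
    · have : c (x - 1) + c (x - 1 + 1) ∈ LB := by rw [hLB]; exact List.mem_map_of_mem hx1K
      have hle := hmBmax _ this
      rw [hxv]
      have hx11 : x - 1 + 1 = x := by omega
      rw [hx11] at hle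
      exact hle
  -- mB ≤ mA
  have h2 : mB ≤ mA := by
    rw [hLB] at hmBmem
    rcases List.mem_map.mp hmBmem with ⟨v, hvK, hveq⟩
    by_cases hv1 : v + 1 ∈ K
    · have hmem : c v + c (v + 1) ∈ LA :=
        buildPV_pair_mem c none S v hplt ((hSmem v).mpr hvK) ((hSmem (v + 1)).mpr hv1)
      have := hmAmax _ hmem
      omega
    · have hz : c (v + 1) = 0 := by
        rw [hc]
        exact counter_getD_not_mem a (v + 1) (fun h => hv1 ((hKmem (v + 1)).mpr h))
      have hmem : c v ∈ LA := buildPV_single_mem c none S v ((hSmem v).mpr hvK)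
      have := hmAmax _ hmem
      omega
  omega
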